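-- pv_equiv track=rewrite | github.com/somi198/Algorithm | Baekjoon/[Greedy]Baekjoon(1105).py | solution
-- ===== SOURCE A (Python) =====
-- def solution(L, R):
--     if len(L) != len(R):
--        return 0
--
--     answer = 0
--     for i in range(len(R)):
--         if L[i] == R[i]:
--             if L[i] == '8': answer += 1
--         else: break
--     return answer
-- ===== SOURCE B (Python) =====
-- def solution(L, R):
--     if len(L) != len(R):
--         return 0
--     # indices where the two strings disagree
--     mismatches = [i for i in range(len(L)) if L[i] != R[i]]
--     # the common prefix ends at the first mismatch (or covers all of L)
--     n = mismatches[0] if mismatches else len(L)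
--     # count the '8's inside that prefix
--     return sum(1 for c in L[:n] if c == '8')
-- ===== Notes on version B (the rewrite author's own statement) =====
-- stated objective: alternative
-- what changed: B is index-based and staged: it builds the list of mismatch indices with a range comprehension, takes the first (or len) as the common-prefix length, and sums '8'-matches over the prefix slice, instead of A's single char-by-char scan with break that counts while comparing.
import Mathlib
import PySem

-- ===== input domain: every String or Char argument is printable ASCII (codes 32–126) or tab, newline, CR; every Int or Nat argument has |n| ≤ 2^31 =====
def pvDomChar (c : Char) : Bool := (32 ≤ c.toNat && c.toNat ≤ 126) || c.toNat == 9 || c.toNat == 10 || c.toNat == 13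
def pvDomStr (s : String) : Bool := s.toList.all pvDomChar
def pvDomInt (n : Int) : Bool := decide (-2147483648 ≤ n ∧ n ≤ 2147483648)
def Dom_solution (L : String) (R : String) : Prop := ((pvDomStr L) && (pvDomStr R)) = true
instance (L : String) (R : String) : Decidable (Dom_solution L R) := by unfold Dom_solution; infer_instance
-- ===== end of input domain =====

-- B's change in one line: an index-based staged computation (mismatch-index list via a
-- range comprehension, its head as the prefix length, then a sum over the prefix slice)
-- instead of A's single char-by-char scan that counts while comparing; same cost.

-- ===== PORT A =====
-- A's loop over i in range(len(R)) with break, walking both strings in step: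
-- counts matching '8's, stops at the first mismatch.
def solLoop : List Char → List Char → Int
  | a :: as, b :: bs =>
      if a = b then (if a = '8' then 1 else 0) + solLoop as bs
      else 0
  | _, _ => 0

def solution (L : String) (R : String) : Int :=
  if L.toList.length ≠ R.toList.length then 0
  else solLoop L.toList R.toList

-- ===== PORT B =====
-- Source B, stage for stage. L[i]/R[i] with i drawn from range(len(L)) (== len(R)) is always
-- in range, so List.getD is exact for Python's indexing here.
def solution_alt (L : String) (R : String) : Int :=
  if L.toList.length ≠ R.toList.length then 0
  else
    let cs := L.toList
    let ds := R.toList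
    let mismatches := (List.range cs.length).filter (fun i => cs.getD i ' ' ≠ ds.getD i ' ')
    let n := mismatches.headD cs.length
    (cs.take n).foldl (fun acc c => if c = '8' then acc + 1 else acc) (0 : Int)

-- ===== PRECONDITION & SPEC =====
def Spec_solution (L : String) (R : String) (out : Int) : Prop := out = solution_alt L R
instance (L : String) (R : String) (out : Int) : Decidable (Spec_solution L R out) := by unfold Spec_solution; infer_instance

-- ===== CLAIM (what is proved, stated in full; the proofs are below) =====
def Claim_equal_solution : Prop := ∀ (L : String) (R : String), Dom_solution L R → Spec_solution L R (solution L R)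

-- ===== LEMMAS AND PROOFS =====

-- ===== VERDICT (by name: the statement is the Claim_ definition above) =====
-- common-prefix length, the shared characterisation of both ports
def cpl : List Char → List Char → Nat
  | a :: as, b :: bs => if a = b then 1 + cpl as bs else 0
  | _, _ => 0

-- A's scan equals: count '8's in the first cpl characters
theorem solLoop_eq_count : ∀ (as bs : List Char),
    solLoop as bs = ((as.take (cpl as bs)).count '8' : Int) := by
  intro as
  induction as with
  | nil => intro bs; cases bs <;> simp [solLoop, cpl]
  | cons a as ih =>
    intro bs
    cases bs with
    | nil => simp [solLoop, cpl]
    | cons b bs =>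
      by_cases h : a = b
      · subst h
        by_cases h8 : a = '8' <;>
          simp [solLoop, cpl, h8, ih bs, Nat.add_comm 1] <;> omega
      · simp [solLoop, cpl, h]

-- B's fold equals: count '8's
theorem foldl_count8 : ∀ (l : List Char) (k : Int),
    l.foldl (fun acc c => if c = '8' then acc + 1 else acc) k = k + (l.count '8' : Int) := by
  intro l
  induction l with
  | nil => simp
  | cons c l ih =>
    intro k
    by_cases h : c = '8' <;> simp [List.foldl, h, ih]; ring

-- B's first mismatch index equals cpl, when the lengths agree
theorem headD_mismatch_eq_cpl : ∀ (as bs : List Char), as.length = bs.length →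
    ((List.range as.length).filter
        (fun i => decide (as.getD i ' ' ≠ bs.getD i ' '))).headD as.length = cpl as bs := by
  intro as
  induction as with
  | nil =>
    intro bs h
    cases bs <;> simp_all [cpl]
  | cons a as ih =>
    intro bs h
    cases bs with
    | nil => simp at h
    | cons b bs =>
      simp only [List.length_cons, Nat.add_right_cancel_iff] at h
      rw [List.length_cons, List.range_succ_eq_map]
      by_cases hab : a = b
      · subst hab
        have hmap : ∀ (l : List Nat) (d : Nat),
            ((l.map Nat.succ).headD (d + 1)) = (l.headD d) + 1 := by
          intro l d; cases l <;> simp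
        simp only [cpl]
        rw [List.filter_cons, if_neg (by simp), List.filter_map]
        simp only [Function.comp_def, List.getD_cons_succ]
        rw [hmap, ih bs h]
        simp [Nat.add_comm]
      · simp [cpl, hab]

-- ===== VERDICT (by name: the statement is the Claim_ definition above) =====
theorem solution_spec : Claim_equal_solution := by
  intro L R _
  unfold Spec_solution solution solution_alt
  split
  · rfl
  · rename_i hlen
    simp only [ne_eq, not_not] at hlen
    simp only []
    rw [headD_mismatch_eq_cpl _ _ hlen, foldl_count8, solLoop_eq_count]
    simp
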